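-- pv_equiv track=rewrite | github.com/prajwal-priyadarshan/soft-tentacle-rl | envs/observation.py | get_observation_names
-- ===== SOURCE A (Python) =====
-- from typing import Dict, Any, Optional
--
-- def get_observation_names(config: Dict, num_joints: int) -> list:
--     """
--     Get list of observation component names.
--
--     Useful for debugging and understanding the observation vector.
--
--     Args:
--         config: Observation config
--         num_joints: Number of joints
--
--     Returns:
--         List of observation names in order
--     """
--     names = []
--
--     if config.get('include_joint_pos', True):
--         names.extend([f'j{i+1}_pos' for i in range(num_joints)])
--
--     if config.get('include_joint_vel', True):
--         names.extend([f'j{i+1}_vel' for i in range(num_joints)])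
--
--     if config.get('include_tip_pos', True):
--         names.extend(['tip_x', 'tip_y', 'tip_z'])
--
--     if config.get('include_target_pos', True):
--         names.extend(['target_x', 'target_y', 'target_z'])
--
--     if config.get('include_distance', True):
--         names.append('distance')
--
--     if config.get('include_prev_action', True):
--         names.extend([f'prev_action_{i}' for i in range(num_joints)])
--
--     return names
-- ===== SOURCE B (Python) =====
-- def get_observation_names(config, num_joints):
--     # Build the full tagged name stream unconditionally, then filter out
--     # components the config explicitly disables (any key not set to a falsy
--     # value is enabled, matching config.get(key, True)).
--     disabled = {key for key, val in config.items() if not val}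
--     tagged = (
--         [('include_joint_pos', f'j{i+1}_pos') for i in range(num_joints)]
--         + [('include_joint_vel', f'j{i+1}_vel') for i in range(num_joints)]
--         + [('include_tip_pos', n) for n in ('tip_x', 'tip_y', 'tip_z')]
--         + [('include_target_pos', n) for n in ('target_x', 'target_y', 'target_z')]
--         + [('include_distance', 'distance')]
--         + [('include_prev_action', f'prev_action_{i}') for i in range(num_joints)]
--     )
--     return [name for key, name in tagged if key not in disabled]
-- ===== Notes on version B (the rewrite author's own statement) =====
-- stated objective: alternative
-- what changed: Instead of six sequential conditional extends, B first precomputes the set of explicitly disabled config keys, builds the complete tagged (key, name) stream unconditionally, and produces the result by one filter-and-project pass over that stream.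
import Mathlib
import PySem

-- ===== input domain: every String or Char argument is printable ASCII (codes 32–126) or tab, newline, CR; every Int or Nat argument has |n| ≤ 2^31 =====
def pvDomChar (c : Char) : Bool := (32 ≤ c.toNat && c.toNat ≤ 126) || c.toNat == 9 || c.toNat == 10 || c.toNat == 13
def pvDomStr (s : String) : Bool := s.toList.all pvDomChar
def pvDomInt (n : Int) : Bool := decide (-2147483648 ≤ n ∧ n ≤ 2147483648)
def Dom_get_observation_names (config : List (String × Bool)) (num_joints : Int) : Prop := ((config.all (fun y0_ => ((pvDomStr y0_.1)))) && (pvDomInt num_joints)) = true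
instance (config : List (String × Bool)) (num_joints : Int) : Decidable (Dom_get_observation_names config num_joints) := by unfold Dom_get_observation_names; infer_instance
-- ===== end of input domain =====

-- B precomputes the set of explicitly disabled keys, builds the full tagged (key, name)
-- stream unconditionally, and filters it in one pass (alternative decomposition; return value only).

-- ===== PORT A =====
def get_observation_names (config : List (String × Bool)) (num_joints : Int) : List String :=
  let names : List String := []
  let names := if PySem.Dict.getD (PySem.Dict.mk config) "include_joint_pos" true then
      names ++ (PySem.List.pyRange 0 num_joints 1).map (fun i => "j" ++ PySem.Int.toStr (i+1) ++ "_pos")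
    else names
  let names := if PySem.Dict.getD (PySem.Dict.mk config) "include_joint_vel" true then
      names ++ (PySem.List.pyRange 0 num_joints 1).map (fun i => "j" ++ PySem.Int.toStr (i+1) ++ "_vel")
    else names
  let names := if PySem.Dict.getD (PySem.Dict.mk config) "include_tip_pos" true then
      names ++ ["tip_x", "tip_y", "tip_z"]
    else names
  let names := if PySem.Dict.getD (PySem.Dict.mk config) "include_target_pos" true then
      names ++ ["target_x", "target_y", "target_z"]
    else names
  let names := if PySem.Dict.getD (PySem.Dict.mk config) "include_distance" true then
      names ++ ["distance"]
    else names
  let names := if PySem.Dict.getD (PySem.Dict.mk config) "include_prev_action" true then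
      names ++ (PySem.List.pyRange 0 num_joints 1).map (fun i => "prev_action_" ++ PySem.Int.toStr i)
    else names
  names

-- ===== PORT B =====
def get_observation_names_alt (config : List (String × Bool)) (num_joints : Int) : List String :=
  let disabled : PySem.Set String :=
    PySem.Set.ofList ((((PySem.Dict.mk config).items.filter (fun kv => !kv.2)).map Prod.fst))
  let tagged : List (String × String) :=
    (PySem.List.pyRange 0 num_joints 1).map (fun i => ("include_joint_pos", "j" ++ PySem.Int.toStr (i+1) ++ "_pos"))
    ++ (PySem.List.pyRange 0 num_joints 1).map (fun i => ("include_joint_vel", "j" ++ PySem.Int.toStr (i+1) ++ "_vel"))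
    ++ (["tip_x", "tip_y", "tip_z"].map (fun n => ("include_tip_pos", n)))
    ++ (["target_x", "target_y", "target_z"].map (fun n => ("include_target_pos", n)))
    ++ [("include_distance", "distance")]
    ++ (PySem.List.pyRange 0 num_joints 1).map (fun i => ("include_prev_action", "prev_action_" ++ PySem.Int.toStr i))
  (tagged.filter (fun kn => !(PySem.Set.contains disabled kn.1))).map Prod.snd

-- ===== PRECONDITION & SPEC =====
-- Pre_ requires the association list's keys to be distinct: config models a Python dict,
-- which cannot hold duplicate keys, so no input A accepts is excluded.
def Pre_get_observation_names (config : List (String × Bool)) (num_joints : Int) : Prop :=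
  (config.map Prod.fst).Nodup
instance (config : List (String × Bool)) (num_joints : Int) : Decidable (Pre_get_observation_names config num_joints) := by unfold Pre_get_observation_names; infer_instance
def pvWitness_get_observation_names : (List (String × Bool)) × Int := ([("include_tip_pos", false)], 2)
def Spec_get_observation_names (config : List (String × Bool)) (num_joints : Int) (out : List String) : Prop := out = get_observation_names_alt config num_joints
instance (config : List (String × Bool)) (num_joints : Int) (out : List String) : Decidable (Spec_get_observation_names config num_joints out) := by unfold Spec_get_observation_names; infer_instance

-- ===== CLAIM (what is proved, stated in full; the proofs are below) =====
def Claim_equal_get_observation_names : Prop := ∀ (config : List (String × Bool)) (num_joints : Int), Dom_get_observation_names config num_joints → Pre_get_observation_names config num_joints → Spec_get_observation_names config num_joints (get_observation_names config num_joints)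

-- ===== LEMMAS AND PROOFS =====

-- with distinct keys, the first-match lookup is false exactly when (k, false) is an entry
lemma getD_false_iff (config : List (String × Bool)) (k : String)
    (hn : (config.map Prod.fst).Nodup) :
    (PySem.Dict.getD (PySem.Dict.mk config) k true = false) ↔ (k, false) ∈ config := by
  induction config with
  | nil => simp [PySem.Dict.getD, PySem.Dict.get?]
  | cons p t ih =>
      obtain ⟨a, b⟩ := p
      simp only [List.map_cons, List.nodup_cons] at hn
      rw [PySem.Dict.getD_eq_get?_getD, PySem.Dict.get?_mk_cons]
      by_cases hak : a = k
      · subst hak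
        cases b
        · simp
        · simp only [beq_self_eq_true, if_true, Option.getD_some, List.mem_cons]
          constructor
          · intro h; cases h
          · rintro (h | h)
            · cases h
            · exact absurd (List.mem_map.mpr ⟨(a, false), h, rfl⟩) hn.1
      · have : (a == k) = false := by simp [hak]
        rw [this]
        simp only [Bool.false_eq_true, if_false, ← PySem.Dict.getD_eq_get?_getD]
        rw [ih hn.2]
        simp [Prod.ext_iff, Ne.symm hak]

-- B's disabled-set membership test is the negation of A's config.get(key, True)
lemma contains_disabled_eq (config : List (String × Bool)) (k : String)
    (hn : (config.map Prod.fst).Nodup) :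
    PySem.Set.contains
      (PySem.Set.ofList (((PySem.Dict.mk config).items.filter (fun kv => !kv.2)).map Prod.fst) : PySem.Set String) k
      = !(PySem.Dict.getD (PySem.Dict.mk config) k true) := by
  have hmem : k ∈ ((PySem.Dict.mk config).items.filter (fun kv => !kv.2)).map Prod.fst
      ↔ (k, false) ∈ config := by
    constructor
    · intro h
      obtain ⟨⟨k', v⟩, hkv, hk⟩ := List.mem_map.mp h
      obtain ⟨hin, hv⟩ := List.mem_filter.mp hkv
      cases v
      · cases hk; exact hin
      · simp at hv
    · intro h
      exact List.mem_map.mpr ⟨(k, false), List.mem_filter.mpr ⟨h, rfl⟩, rfl⟩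
  have hset : PySem.Set.contains
      (PySem.Set.ofList (((PySem.Dict.mk config).items.filter (fun kv => !kv.2)).map Prod.fst) : PySem.Set String) k
      = decide ((k, false) ∈ config) := by
    simp [PySem.Set.contains, PySem.Set.mem_ofList, hmem]
  rw [hset]
  rcases hb : PySem.Dict.getD (PySem.Dict.mk config) k true with _ | _
  · simp [(getD_false_iff config k hn).mp hb]
  · simp
    intro h
    exact absurd ((getD_false_iff config k hn).mpr h) (by simp [hb])

-- a filter whose predicate is constant on a mapped block keeps or drops the whole block
lemma filter_map_const {α β : Type} (xs : List α) (f : α → β) (b : Bool) (p : β → Bool)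
    (h : ∀ x ∈ xs, p (f x) = b) :
    (xs.map f).filter p = if b then xs.map f else [] := by
  induction xs with
  | nil => simp
  | cons x t ih =>
      simp only [List.map_cons, List.filter_cons, h x (by simp)]
      rw [ih (fun y hy => h y (by simp [hy]))]
      cases b <;> simp

-- ===== VERDICT (by name: the statement is the Claim_ definition above) =====
theorem get_observation_names_spec : Claim_equal_get_observation_names := by
  intro config num_joints _ hpre
  unfold Spec_get_observation_names get_observation_names get_observation_names_alt
  have hc := fun k => contains_disabled_eq config k hpre
  simp only [List.filter_append, List.map_append]
  rw [filter_map_const _ _ (PySem.Dict.getD (PySem.Dict.mk config) "include_joint_pos" true)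
      _ (fun x _ => by simpa using congrArg Bool.not (hc "include_joint_pos")),
    filter_map_const _ _ (PySem.Dict.getD (PySem.Dict.mk config) "include_joint_vel" true)
      _ (fun x _ => by simpa using congrArg Bool.not (hc "include_joint_vel")),
    filter_map_const _ _ (PySem.Dict.getD (PySem.Dict.mk config) "include_tip_pos" true)
      _ (fun x _ => by simpa using congrArg Bool.not (hc "include_tip_pos")),
    filter_map_const _ _ (PySem.Dict.getD (PySem.Dict.mk config) "include_target_pos" true)
      _ (fun x _ => by simpa using congrArg Bool.not (hc "include_target_pos")),
    filter_map_const _ _ (PySem.Dict.getD (PySem.Dict.mk config) "include_prev_action" true)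
      _ (fun x _ => by simpa using congrArg Bool.not (hc "include_prev_action"))]
  simp only [List.filter_cons, List.filter_nil, hc]
  split_ifs with h1 h2 h3 h4 h5 h6 <;>
    simp_all [List.map_map, Function.comp_def]
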